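-- pv_equiv track=rewrite | github.com/re-models/rethon | rethon/ensemble_generation.py | _get_min_sets
-- ===== SOURCE A (Python) =====
-- def _get_min_sets(sets, min_sets=None):
--     if not min_sets and len(sets) == 1:
--         return sets
--     elif not min_sets:
--         return _get_min_sets(sets[1:], [sets[0]])
--     elif len(sets) == 0:
--         return min_sets
--     elif len(sets[0]) == len(min_sets[0]):
--         min_sets.append(sets[0])
--         return _get_min_sets(sets[1:], min_sets)
--     elif len(sets[0]) < len(min_sets[0]):
--         return _get_min_sets(sets[1:], [sets[0]])
--     else:
--         return _get_min_sets(sets[1:], min_sets)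
-- ===== SOURCE B (Python) =====
-- def _get_min_sets(sets, min_sets=None):
--     if min_sets:
--         result = list(min_sets)
--         min_len = len(result[0])
--         rest = sets
--     else:
--         result = [sets[0]]
--         min_len = len(sets[0])
--         rest = sets[1:]
--     for s in rest:
--         n = len(s)
--         if n < min_len:
--             min_len = n
--             result = [s]
--         elif n == min_len:
--             result.append(s)
--     return result
-- ===== Notes on version B (the rewrite author's own statement) =====
-- stated objective: simpler
-- what changed: Replaced A's tail recursion (which rebuilds sets[1:] slices and threads the accumulator through recursive calls) by a single explicit loop maintaining min_len and result; return value only (A mutates the passed min_sets list, B copies it).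
import Mathlib
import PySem

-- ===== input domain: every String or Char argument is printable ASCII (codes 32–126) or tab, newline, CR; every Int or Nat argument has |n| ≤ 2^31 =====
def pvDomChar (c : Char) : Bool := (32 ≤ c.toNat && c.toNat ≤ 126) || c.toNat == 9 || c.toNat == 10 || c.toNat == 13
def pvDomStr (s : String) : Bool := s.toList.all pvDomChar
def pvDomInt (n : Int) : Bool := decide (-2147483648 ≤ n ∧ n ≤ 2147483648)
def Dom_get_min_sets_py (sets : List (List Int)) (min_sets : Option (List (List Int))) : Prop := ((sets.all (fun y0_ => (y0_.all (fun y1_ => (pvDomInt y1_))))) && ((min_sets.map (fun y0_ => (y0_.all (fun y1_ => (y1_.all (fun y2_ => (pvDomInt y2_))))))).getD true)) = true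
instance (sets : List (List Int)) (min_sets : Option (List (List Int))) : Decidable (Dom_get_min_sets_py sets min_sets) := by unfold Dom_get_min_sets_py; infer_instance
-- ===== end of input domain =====

-- B replaces A's slice-and-recurse accumulator recursion by one explicit loop over the list
-- (objective: simpler). Return-value equivalence only: Python A mutates the passed min_sets
-- list in place on ties, B copies it.

-- ===== PORT A =====
-- A's falsy test 'not min_sets' is true for None and for the empty list.
def get_min_sets_py (sets : List (List Int)) (min_sets : Option (List (List Int))) : List (List Int) :=
  let ms := min_sets.getD []
  if ms = [] ∧ sets.length = 1 then sets
  else if ms = [] then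
    match sets with
    | [] => []  -- Python raises IndexError here (sets[0]); excluded by Pre_
    | s0 :: rest => get_min_sets_py rest (some [s0])
  else if sets.length = 0 then ms
  else
    match sets with
    | [] => ms  -- unreachable (sets.length ≠ 0)
    | s0 :: rest =>
      if s0.length = ms.headI.length then get_min_sets_py rest (some (ms ++ [s0]))
      else if s0.length < ms.headI.length then get_min_sets_py rest (some [s0])
      else get_min_sets_py rest (some ms)

-- ===== PORT B =====
-- the loop body of Source B
def pvStepB (acc : List (List Int) × Nat) (s : List Int) : List (List Int) × Nat :=
  if s.length < acc.2 then ([s], s.length)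
  else if s.length = acc.2 then (acc.1 ++ [s], acc.2)
  else acc

def get_min_sets_py_alt (sets : List (List Int)) (min_sets : Option (List (List Int))) : List (List Int) :=
  let ms := min_sets.getD []
  let init : List (List Int) × Nat × List (List Int) :=
    if ms ≠ [] then (ms, ms.headI.length, sets)
    else
      match sets with
      | [] => ([], 0, [])  -- Python raises IndexError here (sets[0]); excluded by Pre_
      | s0 :: rest => ([s0], s0.length, rest)
  (init.2.2.foldl pvStepB (init.1, init.2.1)).1

-- ===== PRECONDITION & SPEC =====
-- A (and B) raise IndexError when sets is empty and min_sets is falsy (None or []); excluded.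
def Pre_get_min_sets_py (sets : List (List Int)) (min_sets : Option (List (List Int))) : Prop :=
  ¬ (sets = [] ∧ min_sets.getD [] = [])
instance (sets : List (List Int)) (min_sets : Option (List (List Int))) : Decidable (Pre_get_min_sets_py sets min_sets) := by unfold Pre_get_min_sets_py; infer_instance
def pvWitness_get_min_sets_py : List (List Int) × Option (List (List Int)) := ([[1, 2], [3]], none)

def Spec_get_min_sets_py (sets : List (List Int)) (min_sets : Option (List (List Int))) (out : List (List Int)) : Prop := out = get_min_sets_py_alt sets min_sets
instance (sets : List (List Int)) (min_sets : Option (List (List Int))) (out : List (List Int)) : Decidable (Spec_get_min_sets_py sets min_sets out) := by unfold Spec_get_min_sets_py; infer_instance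

-- ===== CLAIM (what is proved, stated in full; the proofs are below) =====
def Claim_equal_get_min_sets_py : Prop := ∀ (sets : List (List Int)) (min_sets : Option (List (List Int))), Dom_get_min_sets_py sets min_sets → Pre_get_min_sets_py sets min_sets → Spec_get_min_sets_py sets min_sets (get_min_sets_py sets min_sets)

-- ===== LEMMAS AND PROOFS =====

-- A's recursion with a non-empty accumulator equals B's fold over the remaining list.
lemma loop_eq (sets : List (List Int)) : ∀ (ms : List (List Int)), ms ≠ [] →
    get_min_sets_py sets (some ms) = (sets.foldl pvStepB (ms, ms.headI.length)).1 := by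
  induction sets with
  | nil =>
    intro ms h
    simp [get_min_sets_py, h]
  | cons s0 rest ih =>
    intro ms h
    rw [get_min_sets_py]
    simp only [Option.getD_some, List.foldl_cons]
    rw [if_neg (by simp [h]), if_neg h, if_neg (by simp)]
    by_cases hlt : s0.length < ms.headI.length
    · have hstep : pvStepB (ms, ms.headI.length) s0 = ([s0], s0.length) := by
        simp [pvStepB, hlt]
      rw [if_neg (by omega), if_pos hlt, hstep]
      simpa using ih [s0] (by simp)
    · by_cases heq : s0.length = ms.headI.length
      · have hstep : pvStepB (ms, ms.headI.length) s0 = (ms ++ [s0], ms.headI.length) := by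
          simp [pvStepB, heq]
        rw [if_pos heq, hstep, ih (ms ++ [s0]) (by simp)]
        have hh : (ms ++ [s0]).headI = ms.headI := by
          cases ms with
          | nil => exact absurd rfl h
          | cons a t => simp
        rw [hh]
      · have hstep : pvStepB (ms, ms.headI.length) s0 = (ms, ms.headI.length) := by
          simp [pvStepB, hlt, heq]
        rw [if_neg heq, if_neg hlt, hstep]
        exact ih ms h

-- both ports read min_sets only through min_sets.getD []
lemma a_getD (sets : List (List Int)) (min_sets : Option (List (List Int))) :
    get_min_sets_py sets min_sets = get_min_sets_py sets (some (min_sets.getD [])) := by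
  cases min_sets with
  | none => rw [get_min_sets_py.eq_def, get_min_sets_py.eq_def]; rfl
  | some l => rfl

lemma b_getD (sets : List (List Int)) (min_sets : Option (List (List Int))) :
    get_min_sets_py_alt sets min_sets = get_min_sets_py_alt sets (some (min_sets.getD [])) := by
  cases min_sets with
  | none => rw [get_min_sets_py_alt.eq_def, get_min_sets_py_alt.eq_def]; rfl
  | some l => rfl

theorem main_eq (sets : List (List Int)) (min_sets : Option (List (List Int)))
    (hpre : Pre_get_min_sets_py sets min_sets) :
    get_min_sets_py sets min_sets = get_min_sets_py_alt sets min_sets := by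
  unfold Pre_get_min_sets_py at hpre
  rw [a_getD, b_getD]
  by_cases hms : min_sets.getD [] = []
  · rw [hms]
    cases sets with
    | nil => exact absurd ⟨rfl, hms⟩ hpre
    | cons s0 rest =>
      cases rest with
      | nil => simp [get_min_sets_py, get_min_sets_py_alt]
      | cons s1 r =>
        rw [get_min_sets_py]
        simp only [Option.getD_some]
        rw [if_neg (by simp)]
        simp only [if_true]
        rw [get_min_sets_py_alt.eq_def]
        simp only [Option.getD_some]
        rw [if_neg (by simp)]
        simpa using loop_eq (s1 :: r) [s0] (by simp)
  · rw [get_min_sets_py_alt.eq_def]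
    simp only [Option.getD_some]
    rw [if_pos hms]
    exact loop_eq sets (min_sets.getD []) hms

-- ===== VERDICT (by name: the statement is the Claim_ definition above) =====
theorem get_min_sets_py_spec : Claim_equal_get_min_sets_py := by
  intro sets min_sets _ hpre
  exact main_eq sets min_sets hpre
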